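-- pv_equiv track=rewrite | github.com/apattichis/thinktwice | eval/ifeval_metrics.py | _generate_loose_variants
-- ===== SOURCE A (Python) =====
-- def _generate_loose_variants(response: str) -> list[str]:
--     """Generate loose-evaluation variants of a response.
--
--     Matches the original IFEval paper (Google Research implementation):
--     1. Remove asterisk characters (handles bold/italic markdown)
--     2. Remove the first line (handles preamble like "Sure, here's...")
--     3. Remove the last line (handles closing remarks)
--
--     These 3 independent transforms produce 2^3 = 8 variants via power set.
--     """
--     variants = [response]
--
--     # Transform 1: Remove * characters (original paper only strips asterisks)
--     def remove_asterisks(text: str) -> str: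
--         return text.replace('*', '')
--
--     # Transform 2: Remove first line
--     def remove_first_line(text: str) -> str:
--         lines = text.strip().split('\n')
--         if len(lines) <= 1:
--             return text
--         return '\n'.join(lines[1:])
--
--     # Transform 3: Remove last line
--     def remove_last_line(text: str) -> str:
--         lines = text.strip().split('\n')
--         if len(lines) <= 1:
--             return text
--         return '\n'.join(lines[:-1])
--
--     transforms = [remove_asterisks, remove_first_line, remove_last_line]
--
--     # Generate power set of transforms (2^3 = 8 combinations)
--     for mask in range(1, 8):
--         text = response
--         for i, transform in enumerate(transforms):
--             if mask & (1 << i):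
--                 text = transform(text)
--         variants.append(text)
--
--     return variants
-- ===== SOURCE B (Python) =====
-- def _generate_loose_variants(response: str) -> list[str]:
--     """Same 8 loose variants, built by power-set doubling over partition-based transforms."""
--
--     def no_stars(text: str) -> str:
--         return ''.join(ch for ch in text if ch != '*')
--
--     def drop_first_line(text: str) -> str:
--         _, sep, rest = text.strip().partition('\n')
--         return rest if sep else text
--
--     def drop_last_line(text: str) -> str:
--         rest, sep, _ = text.strip().rpartition('\n')
--         return rest if sep else text
--
--     variants = [response]
--     for step in (no_stars, drop_first_line, drop_last_line):
--         variants = variants + [step(v) for v in variants]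
--     return variants
-- ===== Notes on version B (the rewrite author's own statement) =====
-- stated objective: alternative
-- what changed: Replaces the bitmask loop (masks 1..7, each recomputed from scratch with an inner enumerate/bit-test pass over replace/split/join transforms) by incremental power-set doubling over an accumulated variant list, with the transforms themselves re-expressed as a character filter and strip+partition/rpartition at the first/last newline.
import Mathlib
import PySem

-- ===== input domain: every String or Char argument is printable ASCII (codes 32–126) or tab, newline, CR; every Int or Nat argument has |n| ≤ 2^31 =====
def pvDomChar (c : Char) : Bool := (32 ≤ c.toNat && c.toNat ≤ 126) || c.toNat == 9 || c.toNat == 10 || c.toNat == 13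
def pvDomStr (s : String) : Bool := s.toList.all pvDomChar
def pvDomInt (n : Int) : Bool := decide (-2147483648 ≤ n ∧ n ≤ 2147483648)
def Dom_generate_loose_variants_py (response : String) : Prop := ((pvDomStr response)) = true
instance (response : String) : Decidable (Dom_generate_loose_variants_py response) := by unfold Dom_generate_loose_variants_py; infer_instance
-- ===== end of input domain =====

-- B replaces A's bitmask power-set loop (with replace/split/join transforms) by power-set
-- doubling over an accumulated list, with filter/partition/rpartition-style transforms:
-- same 8 variants in the same order (objective: alternative decomposition, not faster).

-- ===== PORT A =====
-- A's three inner transforms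
def pvRemoveAsterisks (text : String) : String := PySem.Str.replace text "*" ""

-- lines = text.strip().split('\n'); '\n'.join(lines[1:])
def pvRemoveFirstLine (text : String) : String :=
  let lines := (PySem.Chars.splitOn (PySem.Str.strip text).toList ['\n']).map String.ofList
  if lines.length ≤ 1 then text
  else PySem.Str.join "\n" (PySem.List.slice lines (some 1) none)

-- lines = text.strip().split('\n'); '\n'.join(lines[:-1])
def pvRemoveLastLine (text : String) : String :=
  let lines := (PySem.Chars.splitOn (PySem.Str.strip text).toList ['\n']).map String.ofList
  if lines.length ≤ 1 then text
  else PySem.Str.join "\n" (PySem.List.slice lines none (some (-1)))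

def pvTransforms : List (String → String) :=
  [pvRemoveAsterisks, pvRemoveFirstLine, pvRemoveLastLine]

-- the body of A's 'for mask' loop: apply the transforms whose bit is set in mask, in index order
def pvMaskApply (mask : Int) (response : String) : String :=
  (PySem.List.enumerate pvTransforms 0).foldl
    (fun text it => if Int.land mask (1 <<< it.1.toNat) ≠ 0 then it.2 text else text)
    response

def generate_loose_variants_py (response : String) : List String :=
  (PySem.List.pyRange 1 8 1).foldl
    (fun variants mask => variants ++ [pvMaskApply mask response])
    [response]

-- ===== PORT B =====
-- ''.join(ch for ch in text if ch != '*')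
def pvbNoStars (text : String) : String :=
  String.ofList (text.toList.filter (fun ch => ch ≠ '*'))

-- _, sep, rest = text.strip().partition('\n'): split at the FIRST newline (ported by hand; exact)
def pvbDropFirstLine (text : String) : String :=
  let core := (PySem.Str.strip text).toList
  if '\n' ∈ core then String.ofList ((core.dropWhile (fun ch => ch ≠ '\n')).drop 1) else text

-- rest, sep, _ = text.strip().rpartition('\n'): split at the LAST newline (ported by hand via reversal; exact)
def pvbDropLastLine (text : String) : String :=
  let core := (PySem.Str.strip text).toList
  if '\n' ∈ core then String.ofList (((core.reverse.dropWhile (fun ch => ch ≠ '\n')).drop 1).reverse)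
  else text

def generate_loose_variants_py_alt (response : String) : List String :=
  [pvbNoStars, pvbDropFirstLine, pvbDropLastLine].foldl
    (fun variants step => variants ++ variants.map step) [response]

-- ===== PRECONDITION & SPEC =====
def Spec_generate_loose_variants_py (response : String) (out : List String) : Prop := out = generate_loose_variants_py_alt response
instance (response : String) (out : List String) : Decidable (Spec_generate_loose_variants_py response out) := by unfold Spec_generate_loose_variants_py; infer_instance

-- ===== CLAIM (what is proved, stated in full; the proofs are below) =====
def Claim_equal_generate_loose_variants_py : Prop := ∀ (response : String), Dom_generate_loose_variants_py response → Spec_generate_loose_variants_py response (generate_loose_variants_py response)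

-- ===== LEMMAS AND PROOFS =====

-- A's str.replace(text, '*', '') removes exactly the '*' characters
lemma pvGoStar : ∀ (l acc : List Char) (fuel : Nat), l.length ≤ fuel →
    PySem.Chars.replace.go ['*'] [] fuel l acc = acc.reverse ++ l.filter (fun ch => ch ≠ '*') := by
  intro l
  induction l with
  | nil => intro acc fuel _; cases fuel <;> simp [PySem.Chars.replace.go]
  | cons c t ih =>
    intro acc fuel hf
    cases fuel with
    | zero => simp at hf
    | succ f =>
      have hf' : t.length ≤ f := by simpa using hf
      by_cases hc : c = '*'
      · subst hc
        simp [PySem.Chars.replace.go, List.isPrefixOf, ih _ _ hf']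
      · simp [PySem.Chars.replace.go, List.isPrefixOf, hc, ih _ _ hf']
        exact fun h => hc h.symm

-- a reference single-character split, and splitOn's characterisation through it
def pvSplit (c : Char) : List Char → List (List Char)
  | [] => [[]]
  | x :: t => if x = c then [] :: pvSplit c t
              else (x :: (pvSplit c t).headI) :: (pvSplit c t).tail

lemma pvSplit_ne_nil (c : Char) (s : List Char) : pvSplit c s ≠ [] := by
  cases s with
  | nil => simp [pvSplit]
  | cons x t => by_cases h : x = c <;> simp [pvSplit, h]

lemma pvGoSplit (c : Char) : ∀ (l cur : List Char) (acc : List (List Char)) (fuel : Nat), l.length ≤ fuel →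
    PySem.Chars.splitOn.go [c] fuel l cur acc =
      acc.reverse ++ (cur.reverse ++ (pvSplit c l).headI) :: (pvSplit c l).tail := by
  intro l
  induction l with
  | nil =>
    intro cur acc fuel _
    cases fuel <;> simp [PySem.Chars.splitOn.go, pvSplit]
  | cons x t ih =>
    intro cur acc fuel hf
    cases fuel with
    | zero => simp at hf
    | succ f =>
      have hf' : t.length ≤ f := by simpa using hf
      by_cases hx : x = c
      · subst hx
        rw [show (pvSplit x (x :: t)) = [] :: pvSplit x t by simp [pvSplit]]
        have := ih [] (cur.reverse :: acc) f hf'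
        simp [PySem.Chars.splitOn.go, List.isPrefixOf, this]
        cases h : pvSplit x t with
        | nil => exact absurd h (pvSplit_ne_nil x t)
        | cons a r => simp
      · have hcx : ¬ c = x := fun h => hx h.symm
        rw [show (pvSplit c (x :: t)) = (x :: (pvSplit c t).headI) :: (pvSplit c t).tail by
          simp [pvSplit, hx]]
        simp [PySem.Chars.splitOn.go, List.isPrefixOf, hcx, ih (x :: cur) acc f hf']

lemma pvSplitOn_eq (c : Char) (s : List Char) : PySem.Chars.splitOn s [c] = pvSplit c s := by
  rw [PySem.Chars.splitOn, pvGoSplit c s [] [] (s.length + 1) (by omega)]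
  cases h : pvSplit c s with
  | nil => exact absurd h (pvSplit_ne_nil c s)
  | cons a r => simp

lemma pvSplit_not_mem (c : Char) (s : List Char) (h : c ∉ s) : pvSplit c s = [s] := by
  induction s with
  | nil => simp [pvSplit]
  | cons x t ih =>
    have hx : ¬ x = c := fun hxc => h (by simp [hxc])
    simp [pvSplit, hx, ih (fun ht => h (List.mem_cons_of_mem _ ht))]

lemma pvSplit_mem (c : Char) (s : List Char) (h : c ∈ s) :
    pvSplit c s = (s.takeWhile (fun ch => ch ≠ c)) ::
      pvSplit c ((s.dropWhile (fun ch => ch ≠ c)).drop 1) := by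
  induction s with
  | nil => simp at h
  | cons x t ih =>
    by_cases hx : x = c
    · subst hx; simp [pvSplit, List.takeWhile, List.dropWhile]
    · have ht : c ∈ t := by cases h with | head => exact absurd rfl hx | tail _ h => exact h
      rw [pvSplit, if_neg hx, ih ht]
      simp [List.takeWhile, List.dropWhile, hx]

lemma pvSplit_intercalate (c : Char) (s : List Char) :
    [c].intercalate (pvSplit c s) = s := by
  induction s with
  | nil => simp [pvSplit, List.intercalate]
  | cons x t ih =>
    by_cases hx : x = c
    · subst hx
      rw [pvSplit, if_pos rfl]
      cases h : pvSplit x t with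
      | nil => exact absurd h (pvSplit_ne_nil x t)
      | cons a r =>
        rw [h] at ih
        simp [List.intercalate] at ih ⊢
        simp [ih]
    · rw [pvSplit, if_neg hx]
      cases h : pvSplit c t with
      | nil => exact absurd h (pvSplit_ne_nil c t)
      | cons a r =>
        rw [h] at ih
        simp [List.intercalate] at ih ⊢
        cases r with
        | nil => simpa using ih
        | cons b rr => simpa using ih

lemma pvSplit_append (c : Char) (u v : List Char) (hv : c ∉ v) :
    pvSplit c (u ++ c :: v) = pvSplit c u ++ [v] := by
  induction u with
  | nil => simp [pvSplit, pvSplit_not_mem c v hv]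
  | cons x u' ih =>
    by_cases hx : x = c
    · subst hx; simp [pvSplit, ih]
    · cases hu : pvSplit c u' with
      | nil => exact absurd hu (pvSplit_ne_nil c u')
      | cons a r =>
        simp only [List.cons_append, pvSplit, if_neg hx, ih, hu]
        simp

-- the three transforms agree pairwise
lemma pvEqStar (r : String) : pvRemoveAsterisks r = pvbNoStars r := by
  rw [pvRemoveAsterisks, pvbNoStars, PySem.Str.replace]
  have : PySem.Chars.replace r.toList "*".toList "".toList = r.toList.filter (fun ch => ch ≠ '*') := by
    rw [show ("*".toList) = ['*'] from rfl, show ("".toList) = ([] : List Char) from rfl,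
      PySem.Chars.replace]
    rw [if_neg (by decide), pvGoStar r.toList [] r.toList.length (le_refl _)]
    simp
  rw [this]

lemma pvEqFirst (r : String) : pvRemoveFirstLine r = pvbDropFirstLine r := by
  rw [pvRemoveFirstLine, pvbDropFirstLine]
  set core := (PySem.Str.strip r).toList with hcore
  rw [pvSplitOn_eq]
  by_cases h : '\n' ∈ core
  · rw [pvSplit_mem _ _ h, if_pos h]
    set rest := (core.dropWhile (fun ch => ch ≠ '\n')).drop 1 with hrest
    cases hu : pvSplit '\n' rest with
    | nil => exact absurd hu (pvSplit_ne_nil _ _)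
    | cons a rres =>
      rw [if_neg (by simp : ¬ ((core.takeWhile (fun ch => ch ≠ '\n') :: a :: rres).map String.ofList).length ≤ 1)]
      rw [show PySem.List.slice ((core.takeWhile (fun ch => ch ≠ '\n') :: a :: rres).map String.ofList) (some 1) none = (a :: rres).map String.ofList by simp [pysem]]
      have hjoin : PySem.Chars.join "\n".toList (List.map String.toList ((a :: rres).map String.ofList)) = rest := by
        rw [show (List.map String.toList ((a :: rres).map String.ofList)) = a :: rres by simp [Function.comp_def],
            show ("\n".toList) = ['\n'] from rfl, PySem.Chars.join, ← hu, pvSplit_intercalate]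
      rw [PySem.Str.join, hjoin]
  · rw [pvSplit_not_mem _ _ h, if_neg h]
    simp

lemma pvEqLast (r : String) : pvRemoveLastLine r = pvbDropLastLine r := by
  rw [pvRemoveLastLine, pvbDropLastLine]
  set core := (PySem.Str.strip r).toList with hcore
  rw [pvSplitOn_eq]
  by_cases h : '\n' ∈ core
  · rw [if_pos h]
    have hdw : core.reverse.dropWhile (fun ch => ch ≠ '\n') ≠ [] := by
      simp only [ne_eq, List.dropWhile_eq_nil_iff]
      intro hall
      have := hall '\n' (by simpa using h)
      simp at this
    have hdwe : core.reverse.dropWhile (fun ch => ch ≠ '\n') =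
        '\n' :: (core.reverse.dropWhile (fun ch => ch ≠ '\n')).tail := by
      have hh : (core.reverse.dropWhile (fun ch => ch ≠ '\n')).head hdw = '\n' := by
        simpa using List.head_dropWhile_not (fun ch => ch ≠ '\n') hdw
      conv_lhs => rw [← List.cons_head_tail hdw]
      rw [hh]
    set t := (core.reverse.dropWhile (fun ch => ch ≠ '\n')).tail with ht
    have hdecomp : core = t.reverse ++ '\n' :: (core.reverse.takeWhile (fun ch => ch ≠ '\n')).reverse := by
      conv_lhs => rw [← List.reverse_reverse core,
        ← List.takeWhile_append_dropWhile (p := fun ch => ch ≠ '\n') (l := core.reverse)]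
      rw [hdwe]
      simp
    have hv : '\n' ∉ (core.reverse.takeWhile (fun ch => ch ≠ '\n')).reverse := by
      intro hm
      have := List.mem_takeWhile_imp (by simpa using hm)
      simp at this
    have hsplit := pvSplit_append '\n' t.reverse ((core.reverse.takeWhile (fun ch => ch ≠ '\n')).reverse) hv
    rw [← hdecomp] at hsplit
    rw [hsplit]
    cases hu : pvSplit '\n' t.reverse with
    | nil => exact absurd hu (pvSplit_ne_nil _ _)
    | cons a rres =>
      rw [if_neg (by simp)]
      rw [PySem.List.slice_to_neg_one,
        show (List.map String.ofList (a :: rres ++ [(core.reverse.takeWhile (fun ch => ch ≠ '\n')).reverse])).dropLast = ((a :: rres).map String.ofList) by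
          rw [List.map_append, List.map_singleton, List.dropLast_concat]]
      have hjoin : PySem.Chars.join "\n".toList (List.map String.toList ((a :: rres).map String.ofList)) = t.reverse := by
        rw [show (List.map String.toList ((a :: rres).map String.ofList)) = a :: rres by simp [Function.comp_def],
            show ("\n".toList) = ['\n'] from rfl, PySem.Chars.join, ← hu, pvSplit_intercalate]
      rw [PySem.Str.join, hjoin, hdwe]
      simp
  · rw [pvSplit_not_mem _ _ h, if_neg h]
    simp

-- A's seven masked combinations, unrolled
lemma pvEnum : PySem.List.enumerate pvTransforms 0 =
    [(0, pvRemoveAsterisks), (1, pvRemoveFirstLine), (2, pvRemoveLastLine)] := by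
  simp [pvTransforms, PySem.List.enumerate]

lemma pvRange18 : PySem.List.pyRange 1 8 1 = [1, 2, 3, 4, 5, 6, 7] := by decide

lemma pvMask1 (r : String) : pvMaskApply 1 r = pvRemoveAsterisks r := by
  rw [pvMaskApply, pvEnum, List.foldl_cons, List.foldl_cons, List.foldl_cons, List.foldl_nil,
    if_neg (by decide), if_neg (by decide), if_pos (by decide)]
lemma pvMask2 (r : String) : pvMaskApply 2 r = pvRemoveFirstLine r := by
  rw [pvMaskApply, pvEnum, List.foldl_cons, List.foldl_cons, List.foldl_cons, List.foldl_nil,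
    if_neg (by decide), if_pos (by decide), if_neg (by decide)]
lemma pvMask3 (r : String) : pvMaskApply 3 r = pvRemoveFirstLine (pvRemoveAsterisks r) := by
  rw [pvMaskApply, pvEnum, List.foldl_cons, List.foldl_cons, List.foldl_cons, List.foldl_nil,
    if_neg (by decide), if_pos (by decide), if_pos (by decide)]
lemma pvMask4 (r : String) : pvMaskApply 4 r = pvRemoveLastLine r := by
  rw [pvMaskApply, pvEnum, List.foldl_cons, List.foldl_cons, List.foldl_cons, List.foldl_nil,
    if_pos (by decide), if_neg (by decide), if_neg (by decide)]
lemma pvMask5 (r : String) : pvMaskApply 5 r = pvRemoveLastLine (pvRemoveAsterisks r) := by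
  rw [pvMaskApply, pvEnum, List.foldl_cons, List.foldl_cons, List.foldl_cons, List.foldl_nil,
    if_pos (by decide), if_neg (by decide), if_pos (by decide)]
lemma pvMask6 (r : String) : pvMaskApply 6 r = pvRemoveLastLine (pvRemoveFirstLine r) := by
  rw [pvMaskApply, pvEnum, List.foldl_cons, List.foldl_cons, List.foldl_cons, List.foldl_nil,
    if_pos (by decide), if_pos (by decide), if_neg (by decide)]
lemma pvMask7 (r : String) : pvMaskApply 7 r = pvRemoveLastLine (pvRemoveFirstLine (pvRemoveAsterisks r)) := by
  rw [pvMaskApply, pvEnum, List.foldl_cons, List.foldl_cons, List.foldl_cons, List.foldl_nil,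
    if_pos (by decide), if_pos (by decide), if_pos (by decide)]

-- ===== VERDICT (by name: the statement is the Claim_ definition above) =====
theorem generate_loose_variants_py_spec : Claim_equal_generate_loose_variants_py := by
  intro response _
  show generate_loose_variants_py response = generate_loose_variants_py_alt response
  rw [generate_loose_variants_py, generate_loose_variants_py_alt, pvRange18]
  simp only [List.foldl_cons, List.foldl_nil, pvMask1, pvMask2, pvMask3, pvMask4, pvMask5,
    pvMask6, pvMask7, List.map_cons, List.map_nil, List.map_append, List.cons_append,
    List.nil_append, List.append_assoc]
  simp only [pvEqStar, pvEqFirst, pvEqLast]
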